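-- pv_equiv track=rewrite | github.com/15680676726/superSpider | src/copaw/capabilities/donor_probe_service.py | _pick_adapter_probe_action_id
-- ===== SOURCE A (Python) =====
-- from typing import Any
--
-- def _string(value: object | None) -> str | None:
--     if value is None:
--         return None
--     text = str(value).strip()
--     return text or None
--
-- def _pick_adapter_probe_action_id(actions: list[dict[str, Any]]) -> str | None:
--     action_ids = [
--         _string(item.get("action_id"))
--         for item in actions
--         if _string(item.get("action_id")) is not None
--     ]
--     preferred = ("status", "healthcheck", "ping", "execute_task", "run")
--     for candidate in preferred:
--         if candidate in action_ids:
--             return candidate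
--     return action_ids[0] if action_ids else None
-- ===== SOURCE B (Python) =====
-- def _string(value):
--     if value is None:
--         return None
--     text = str(value).strip()
--     return text or None
--
--
-- def _pick_adapter_probe_action_id(actions):
--     preferred = ("status", "healthcheck", "ping", "execute_task", "run")
--     rank = {name: i for i, name in enumerate(preferred)}
--     first = None
--     best = len(preferred)
--     for item in actions:
--         s = _string(item.get("action_id"))
--         if s is None:
--             continue
--         if first is None:
--             first = s
--         r = rank.get(s, len(preferred))
--         if r < best:
--             best = r
--     return preferred[best] if best < len(preferred) else first
-- ===== Notes on version B (the rewrite author's own statement) =====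
-- stated objective: alternative
-- what changed: Replaces A's build-the-full-id-list plus five membership scans with one pass over actions that maintains the first valid id and the minimum preferred-rank seen (rank looked up in a dict built once); measured cost is the same.
import Mathlib
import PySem

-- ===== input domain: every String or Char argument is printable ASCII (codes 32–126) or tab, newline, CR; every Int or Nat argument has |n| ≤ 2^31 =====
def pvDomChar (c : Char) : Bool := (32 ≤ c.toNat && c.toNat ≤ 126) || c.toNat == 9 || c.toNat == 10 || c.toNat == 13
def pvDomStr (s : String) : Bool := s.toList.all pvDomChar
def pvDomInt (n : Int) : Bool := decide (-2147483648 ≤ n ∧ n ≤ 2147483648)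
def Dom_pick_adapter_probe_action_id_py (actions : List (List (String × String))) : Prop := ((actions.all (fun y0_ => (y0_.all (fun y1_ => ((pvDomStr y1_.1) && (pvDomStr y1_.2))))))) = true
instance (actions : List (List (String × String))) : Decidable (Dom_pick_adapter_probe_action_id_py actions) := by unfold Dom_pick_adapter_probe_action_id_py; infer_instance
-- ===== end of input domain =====

-- B replaces A's full id-list plus five membership scans with one pass keeping the first valid id and the minimum preferred rank.

-- shared helper: Python dict .get("action_id") on the association list (first match)
def pvGetActionId : List (String × String) → Option String
  | [] => none
  | (k, v) :: rest => if k == "action_id" then some v else pvGetActionId rest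

-- shared helper: the module-level _string (strip; empty → None)
def pvString? (v : Option String) : Option String :=
  match v with
  | none => none
  | some s =>
    let t := PySem.Str.strip s
    if t = "" then none else some t

def pvPreferred : List String := ["status", "healthcheck", "ping", "execute_task", "run"]

-- ===== PORT A =====
def pick_adapter_probe_action_id_py (actions : List (List (String × String))) : Option String :=
  let action_ids := actions.filterMap (fun item => pvString? (pvGetActionId item))
  match pvPreferred.find? (fun c => action_ids.contains c) with
  | some c => some c
  | none => action_ids.head?

-- ===== PORT B =====
-- rank.get(s, len(preferred)) of Source B: index in the preferred list, 5 when absent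
def pvRank (s : String) : Nat := pvPreferred.idxOf s

def pvStep (st : Option String × Nat) (item : List (String × String)) : Option String × Nat :=
  match pvString? (pvGetActionId item) with
  | none => st
  | some s =>
    let first := match st.1 with | none => some s | some f => some f
    let r := pvRank s
    (first, if r < st.2 then r else st.2)

def pick_adapter_probe_action_id_py_alt (actions : List (List (String × String))) : Option String :=
  let st := actions.foldl pvStep (none, pvPreferred.length)
  if st.2 < pvPreferred.length then pvPreferred[st.2]? else st.1

-- ===== PRECONDITION & SPEC =====
def Spec_pick_adapter_probe_action_id_py (actions : List (List (String × String))) (out : Option String) : Prop := out = pick_adapter_probe_action_id_py_alt actions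
instance (actions : List (List (String × String))) (out : Option String) : Decidable (Spec_pick_adapter_probe_action_id_py actions out) := by unfold Spec_pick_adapter_probe_action_id_py; infer_instance

-- ===== CLAIM (what is proved, stated in full; the proofs are below) =====
def Claim_equal_pick_adapter_probe_action_id_py : Prop := ∀ (actions : List (List (String × String))), Dom_pick_adapter_probe_action_id_py actions → Spec_pick_adapter_probe_action_id_py actions (pick_adapter_probe_action_id_py actions)

-- ===== LEMMAS AND PROOFS =====

/-- minimum preferred rank over a list of ids (5 if none is preferred) -/
def pvM (ids : List String) : Nat := ids.foldr (fun s m => min (pvRank s) m) 5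

theorem pvM_le_five (ids : List String) : pvM ids ≤ 5 := by
  induction ids with
  | nil => simp [pvM]
  | cons s ids ih => simp only [pvM, List.foldr_cons] at *; omega

theorem pvM_le_of_mem {ids : List String} {s : String} (h : s ∈ ids) : pvM ids ≤ pvRank s := by
  induction ids with
  | nil => simp at h
  | cons a ids ih =>
    simp only [pvM, List.foldr_cons]
    rcases List.mem_cons.1 h with rfl | h
    · omega
    · have := ih h; simp only [pvM] at this; omega

theorem pvM_exists {ids : List String} (h : pvM ids < 5) : ∃ s, s ∈ ids ∧ pvRank s = pvM ids := by
  induction ids with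
  | nil => simp [pvM] at h
  | cons a ids ih =>
    simp only [pvM, List.foldr_cons] at h ⊢
    by_cases hle : pvRank a ≤ pvM ids
    · exact ⟨a, List.mem_cons_self, by simp only [pvM] at hle; omega⟩
    · have h' : pvM ids < 5 := by simp only [pvM] at hle ⊢; omega
      obtain ⟨s, hs, hr⟩ := ih h'
      exact ⟨s, List.mem_cons_of_mem _ hs, by simp only [pvM] at hle hr ⊢; omega⟩

theorem pvRank_cases (s : String) :
    pvRank s = 5 ∨ s = "status" ∨ s = "healthcheck" ∨ s = "ping" ∨ s = "execute_task" ∨ s = "run" := by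
  by_cases h : s ∈ pvPreferred
  · simp only [pvPreferred, List.mem_cons, List.not_mem_nil, or_false] at h
    tauto
  · left
    have := List.idxOf_eq_length h
    simpa [pvRank, pvPreferred] using this

theorem pvM_ne {ids : List String} {j : Nat} (hj : j < 5)
    (habs : pvPreferred.getD j "" ∉ ids) : pvM ids ≠ j := by
  intro he
  obtain ⟨s, hs, hrs⟩ := pvM_exists (ids := ids) (by omega)
  rcases pvRank_cases s with h5 | rfl | rfl | rfl | rfl | rfl
  · omega
  · have hr : pvRank "status" = 0 := by decide
    have : j = 0 := by omega
    subst this; simp [pvPreferred] at habs; exact habs hs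
  · have hr : pvRank "healthcheck" = 1 := by decide
    have : j = 1 := by omega
    subst this; simp [pvPreferred] at habs; exact habs hs
  · have hr : pvRank "ping" = 2 := by decide
    have : j = 2 := by omega
    subst this; simp [pvPreferred] at habs; exact habs hs
  · have hr : pvRank "execute_task" = 3 := by decide
    have : j = 3 := by omega
    subst this; simp [pvPreferred] at habs; exact habs hs
  · have hr : pvRank "run" = 4 := by decide
    have : j = 4 := by omega
    subst this; simp [pvPreferred] at habs; exact habs hs

theorem fold_char (actions : List (List (String × String))) (st : Option String × Nat)
    (h : st.2 ≤ 5) :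
    actions.foldl pvStep st =
      ((match st.1 with
        | none => (actions.filterMap (fun item => pvString? (pvGetActionId item))).head?
        | some f => some f),
       min st.2 (pvM (actions.filterMap (fun item => pvString? (pvGetActionId item))))) := by
  induction actions generalizing st with
  | nil =>
    obtain ⟨o, b⟩ := st
    have h5 : b ≤ 5 := h
    simp only [List.foldl_nil, List.filterMap_nil, List.head?_nil, pvM, List.foldr_nil]
    cases o <;> simp only [Prod.mk.injEq] <;> exact ⟨trivial, by omega⟩
  | cons a rest ih =>
    obtain ⟨o, b⟩ := st
    have h5 : b ≤ 5 := h
    simp only [List.foldl_cons, List.filterMap_cons]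
    cases hg : pvString? (pvGetActionId a) with
    | none =>
      simp only [pvStep, hg]
      exact ih (o, b) h
    | some s =>
      simp only [pvStep, hg]
      have hmin : (if pvRank s < b then pvRank s else b) = min b (pvRank s) := by
        split <;> omega
      have hb' : (if pvRank s < b then pvRank s else b) ≤ 5 := by omega
      rw [ih _ hb']
      cases o with
      | none =>
        simp only [List.head?_cons, pvM, List.foldr_cons, Prod.mk.injEq, hmin]
        exact ⟨trivial, by omega⟩
      | some f =>
        simp only [pvM, List.foldr_cons, Prod.mk.injEq, hmin]
        exact ⟨trivial, by omega⟩

theorem main_ids (ids : List String) :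
    (match pvPreferred.find? (fun c => ids.contains c) with
     | some c => some c
     | none => ids.head?) =
    (if pvM ids < pvPreferred.length then pvPreferred[pvM ids]? else ids.head?) := by
  by_cases h0 : "status" ∈ ids
  · have hM : pvM ids = 0 := by
      have := pvM_le_of_mem h0
      have hr : pvRank "status" = 0 := by decide
      omega
    simp [pvPreferred, h0, hM]
  · by_cases h1 : "healthcheck" ∈ ids
    · have hM : pvM ids = 1 := by
        have hle := pvM_le_of_mem h1
        have hr : pvRank "healthcheck" = 1 := by decide
        have hne0 := pvM_ne (ids := ids) (j := 0) (by omega) (by simpa [pvPreferred] using h0)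
        omega
      simp [pvPreferred, h0, h1, hM]
    · by_cases h2 : "ping" ∈ ids
      · have hM : pvM ids = 2 := by
          have hle := pvM_le_of_mem h2
          have hr : pvRank "ping" = 2 := by decide
          have hne0 := pvM_ne (ids := ids) (j := 0) (by omega) (by simpa [pvPreferred] using h0)
          have hne1 := pvM_ne (ids := ids) (j := 1) (by omega) (by simpa [pvPreferred] using h1)
          omega
        simp [pvPreferred, h0, h1, h2, hM]
      · by_cases h3 : "execute_task" ∈ ids
        · have hM : pvM ids = 3 := by
            have hle := pvM_le_of_mem h3
            have hr : pvRank "execute_task" = 3 := by decide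
            have hne0 := pvM_ne (ids := ids) (j := 0) (by omega) (by simpa [pvPreferred] using h0)
            have hne1 := pvM_ne (ids := ids) (j := 1) (by omega) (by simpa [pvPreferred] using h1)
            have hne2 := pvM_ne (ids := ids) (j := 2) (by omega) (by simpa [pvPreferred] using h2)
            omega
          simp [pvPreferred, h0, h1, h2, h3, hM]
        · by_cases h4 : "run" ∈ ids
          · have hM : pvM ids = 4 := by
              have hle := pvM_le_of_mem h4
              have hr : pvRank "run" = 4 := by decide
              have hne0 := pvM_ne (ids := ids) (j := 0) (by omega) (by simpa [pvPreferred] using h0)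
              have hne1 := pvM_ne (ids := ids) (j := 1) (by omega) (by simpa [pvPreferred] using h1)
              have hne2 := pvM_ne (ids := ids) (j := 2) (by omega) (by simpa [pvPreferred] using h2)
              have hne3 := pvM_ne (ids := ids) (j := 3) (by omega) (by simpa [pvPreferred] using h3)
              omega
            simp [pvPreferred, h0, h1, h2, h3, h4, hM]
          · have hM : pvM ids = 5 := by
              have hle := pvM_le_five ids
              have hne0 := pvM_ne (ids := ids) (j := 0) (by omega) (by simpa [pvPreferred] using h0)
              have hne1 := pvM_ne (ids := ids) (j := 1) (by omega) (by simpa [pvPreferred] using h1)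
              have hne2 := pvM_ne (ids := ids) (j := 2) (by omega) (by simpa [pvPreferred] using h2)
              have hne3 := pvM_ne (ids := ids) (j := 3) (by omega) (by simpa [pvPreferred] using h3)
              have hne4 := pvM_ne (ids := ids) (j := 4) (by omega) (by simpa [pvPreferred] using h4)
              omega
            simp [pvPreferred, h0, h1, h2, h3, h4, hM]

-- ===== VERDICT (by name: the statement is the Claim_ definition above) =====
theorem pick_adapter_probe_action_id_py_spec : Claim_equal_pick_adapter_probe_action_id_py := by
  intro actions _
  unfold Spec_pick_adapter_probe_action_id_py
  unfold pick_adapter_probe_action_id_py pick_adapter_probe_action_id_py_alt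
  rw [fold_char actions (none, pvPreferred.length) (by simp [pvPreferred])]
  simp only
  rw [Nat.min_eq_right (by simpa [pvPreferred] using pvM_le_five _)]
  exact main_ids _
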